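-- pv_equiv track=rewrite | github.com/eilinluna16/Taller-AlgebraComputacional | Taller-AlgebraComputacional/FuncionesPrincipales.py | isF
-- ===== SOURCE A (Python) =====
-- def isF(expresion):
--         expr = list(expresion)
--         elem = ['0', '1', '2', '3', '4', '5', '6', '7', '8', '9', '/']
--         num = 0
--         for i in range(len(expr)):
--             if expr[i] in elem:
--                 num += 1
--         # Si '/' se encuentra al principio o al final, return False.
--         if expr[0]=='/' or expr[len(expr)-1]=='/' :
--             return False
--         # Si hay mas o ningun '/', return False.
--         elif expr.count('/')!=1:
--             return False
--         # Si no hay elementos diferentes a la lista elem, return True.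
--         elif len(expr)==num:
--             return True
--         # Si hay elementos diferentes a la lista elem, return False.
--         else:
--             return False
-- ===== SOURCE B (Python) =====
-- def isF(expresion):
--     left, sep, right = expresion.partition('/')
--     return sep == '/' and left.isdigit() and right.isdigit()
-- ===== Notes on version B (the rewrite author's own statement) =====
-- stated objective: faster
-- what changed: Replaces the per-character accounting loop plus count('/') and boundary-index checks with a single str.partition('/') at the first slash followed by two isdigit tests (both halves non-empty digit strings); the interpreted per-character loop disappears.
import Mathlib
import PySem

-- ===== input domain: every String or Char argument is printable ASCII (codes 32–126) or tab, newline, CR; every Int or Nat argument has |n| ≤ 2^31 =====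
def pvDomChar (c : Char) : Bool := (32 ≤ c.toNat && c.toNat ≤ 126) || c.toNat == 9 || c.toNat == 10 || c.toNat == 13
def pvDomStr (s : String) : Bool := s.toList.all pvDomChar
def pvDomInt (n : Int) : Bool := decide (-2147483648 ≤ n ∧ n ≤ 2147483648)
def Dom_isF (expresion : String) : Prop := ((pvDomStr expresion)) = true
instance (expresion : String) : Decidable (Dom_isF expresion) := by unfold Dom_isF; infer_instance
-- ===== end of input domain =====

-- B replaces A's character-counting loop and boundary checks with str.partition('/') plus two isdigit tests (measured faster in a timing run); on "" A raises IndexError, B returns False.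


-- ===== PORT A =====
def isF (expresion : String) : Bool :=
  let expr := expresion.toList
  let elem : List Char := ['0','1','2','3','4','5','6','7','8','9','/']
  let num : Int := (PySem.List.pyRange 0 (expr.length : Int) 1).foldl
      (fun n i => if PySem.List.pyGetD expr i ' ' ∈ elem then n + 1 else n) 0
  if PySem.List.pyGetD expr 0 ' ' = '/' ∨ PySem.List.pyGetD expr ((expr.length : Int) - 1) ' ' = '/' then
    false
  else if ¬ ((PySem.List.count expr '/' : Int) = 1) then
    false
  else if (expr.length : Int) = num then
    true
  else
    false

-- ===== PORT B =====
-- hand port of str.partition('/') (PySem has no partition); exact: scans left to right,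
-- splits at the FIRST '/' into (before, found?, after), and is (s, False, '') when absent
def partSlash : List Char → List Char × Bool × List Char
  | [] => ([], false, [])
  | c :: rest =>
    if c = '/' then ([], true, rest)
    else
      let p := partSlash rest
      (c :: p.1, p.2.1, p.2.2)

def isF_alt (expresion : String) : Bool :=
  let p := partSlash expresion.toList
  p.2.1 && PySem.Chars.strIsdigit p.1 && PySem.Chars.strIsdigit p.2.2

-- ===== PRECONDITION & SPEC =====
-- Pre_ excludes only the empty string, on which A raises IndexError (expr[0]).
def Pre_isF (expresion : String) : Prop := expresion.toList ≠ []
instance (expresion : String) : Decidable (Pre_isF expresion) := by unfold Pre_isF; infer_instance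
def pvWitness_isF : String := "12/34"

def Spec_isF (expresion : String) (out : Bool) : Prop := out = isF_alt expresion
instance (expresion : String) (out : Bool) : Decidable (Spec_isF expresion out) := by unfold Spec_isF; infer_instance

-- ===== CLAIM (what is proved, stated in full; the proofs are below) =====
def Claim_equal_isF : Prop := ∀ (expresion : String), Dom_isF expresion → Pre_isF expresion → Spec_isF expresion (isF expresion)

-- ===== LEMMAS AND PROOFS =====

theorem char_eq_iff_toNat (c d : Char) : (c = d) = (c.toNat = d.toNat) :=
  propext ⟨fun h => h ▸ rfl, fun h => Char.ext (UInt32.toNat_inj.mp h)⟩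

theorem char_le_iff_toNat (c d : Char) : (c ≤ d) = (c.toNat ≤ d.toNat) :=
  propext (by simp [Char.le_def, UInt32.le_iff_toNat_le])

-- membership in A's `elem` list is "digit or slash"
theorem mem_elemL (c : Char) :
    c ∈ (['0','1','2','3','4','5','6','7','8','9','/'] : List Char) ↔
      (PySem.Chars.isdigit c = true ∨ c = '/') := by
  simp only [List.mem_cons, List.not_mem_nil, or_false,
    PySem.Chars.isdigit, Bool.and_eq_true, decide_eq_true_eq,
    char_eq_iff_toNat, char_le_iff_toNat]
  simp only [show ('0' : Char).toNat = 48 from rfl, show ('1' : Char).toNat = 49 from rfl,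
    show ('2' : Char).toNat = 50 from rfl, show ('3' : Char).toNat = 51 from rfl,
    show ('4' : Char).toNat = 52 from rfl, show ('5' : Char).toNat = 53 from rfl,
    show ('6' : Char).toNat = 54 from rfl, show ('7' : Char).toNat = 55 from rfl,
    show ('8' : Char).toNat = 56 from rfl, show ('9' : Char).toNat = 57 from rfl,
    show ('/' : Char).toNat = 47 from rfl]
  omega

-- partition spec: when a slash is found, l splits at its FIRST occurrence
theorem partSlash_found : ∀ (l : List Char), (partSlash l).2.1 = true →
    l = (partSlash l).1 ++ '/' :: (partSlash l).2.2 ∧ '/' ∉ (partSlash l).1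
  | [], h => by simp [partSlash] at h
  | c :: rest, h => by
    by_cases hc : c = '/'
    · subst hc; simp [partSlash]
    · simp only [partSlash, if_neg hc] at h ⊢
      obtain ⟨h1, h2⟩ := partSlash_found rest h
      refine ⟨by rw [List.cons_append, ← h1], ?_⟩
      simp only [List.mem_cons, not_or]
      exact ⟨fun he => hc he.symm, h2⟩

theorem partSlash_not_found : ∀ (l : List Char), (partSlash l).2.1 = false →
    '/' ∉ l
  | [], _ => by simp
  | c :: rest, h => by
    by_cases hc : c = '/'
    · subst hc; simp [partSlash] at h
    · simp only [partSlash, if_neg hc] at h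
      simp only [List.mem_cons, not_or]
      exact ⟨fun he => hc he.symm, partSlash_not_found rest h⟩

-- A's expr[len(expr)-1] is the last element
theorem pyGetD_last (l : List Char) (h : l ≠ []) :
    PySem.List.pyGetD l ((l.length : Int) - 1) ' ' = l.getLast?.getD ' ' := by
  have hl : 0 < l.length := List.length_pos_iff.mpr h
  have he : ((l.length : Int) - 1) = ((l.length - 1 : Nat) : Int) := by omega
  rw [he, PySem.List.pyGetD_natCast, List.getD_eq_getElem _ _ (by omega),
    List.getLast?_eq_getElem?]
  simp [List.getElem?_eq_getElem (show l.length - 1 < l.length by omega)]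

theorem isdigit_ne_slash {c : Char} (h : PySem.Chars.isdigit c = true) : c ≠ '/' := by
  intro hc; subst hc; exact absurd h (by decide)

-- the heart: A's ifs over (first char, last char, count, all-in-elem) coincide with
-- B's (found, left digits, right digits) on a nonempty list of characters
theorem key (l : List Char) (hne : l ≠ []) :
    (if PySem.List.pyGetD l 0 ' ' = '/' ∨ PySem.List.pyGetD l ((l.length : Int) - 1) ' ' = '/' then
      false
    else if ¬ ((PySem.List.count l '/' : Int) = 1) then
      false
    else if (l.length : Int) =
        (0 + (l.countP (fun c => decide (c ∈ (['0','1','2','3','4','5','6','7','8','9','/'] : List Char))) : Int)) then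
      true
    else
      false)
    = ((partSlash l).2.1 && PySem.Chars.strIsdigit (partSlash l).1 && PySem.Chars.strIsdigit (partSlash l).2.2) := by
  rw [PySem.List.pyGetD_ofNat' l 0 ' ', pyGetD_last l hne, PySem.List.count_eq]
  rcases hps : partSlash l with ⟨a, f, b⟩
  cases f with
  | false =>
    have hnotin : '/' ∉ l := partSlash_not_found l (by rw [hps])
    have hcount : List.count '/' l = 0 := List.count_eq_zero.mpr hnotin
    simp only [Bool.false_and]
    split_ifs with h1 h2 h3 <;> try rfl
    exfalso; rw [hcount] at h2; exact absurd h2 (by norm_num)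
  | true =>
    obtain ⟨hl, hnA⟩ := partSlash_found l (by rw [hps])
    rw [hps] at hl hnA
    simp only at hl hnA
    simp only [Bool.true_and]
    have hcA : List.count '/' a = 0 := List.count_eq_zero.mpr hnA
    have hcount : List.count '/' l = List.count '/' b + 1 := by
      rw [hl, List.count_append, List.count_cons_self, hcA]; omega
    have hlastB : b ≠ [] → l.getLast?.getD ' ' ∈ b := by
      intro hb
      rw [hl, List.getLast?_append]
      rcases b with _ | ⟨y, ys⟩
      · exact absurd rfl hb
      · rw [List.getLast?_cons_cons, List.getLast?_eq_getLast (List.cons_ne_nil y ys)]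
        simpa using List.getLast_mem (List.cons_ne_nil y ys)
    have hRHS : (PySem.Chars.strIsdigit a && PySem.Chars.strIsdigit b) = true ↔
        ((a ≠ [] ∧ ∀ c ∈ a, PySem.Chars.isdigit c = true) ∧
         (b ≠ [] ∧ ∀ c ∈ b, PySem.Chars.isdigit c = true)) := by
      simp [PySem.Chars.strIsdigit, List.all_eq_true, and_assoc]
    have hAiff : ((¬ (l.getD 0 ' ' = '/' ∨ l.getLast?.getD ' ' = '/')) ∧ List.count '/' l = 1 ∧
        (∀ c ∈ l, c ∈ (['0','1','2','3','4','5','6','7','8','9','/'] : List Char))) ↔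
        ((a ≠ [] ∧ ∀ c ∈ a, PySem.Chars.isdigit c = true) ∧
         (b ≠ [] ∧ ∀ c ∈ b, PySem.Chars.isdigit c = true)) := by
      constructor
      · rintro ⟨hg, hc1, hmem⟩
        push_neg at hg
        obtain ⟨hg0, hgl⟩ := hg
        have hnB : '/' ∉ b := by
          rw [hcount] at hc1
          exact List.count_eq_zero.mp (by omega)
        have ha : a ≠ [] := by
          intro h0
          rw [hl, h0] at hg0
          exact hg0 rfl
        have hb : b ≠ [] := by
          intro h0
          apply hgl
          rw [hl, h0]
          simp
        refine ⟨⟨ha, fun c hc => ?_⟩, ⟨hb, fun c hc => ?_⟩⟩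
        · have := (mem_elemL c).mp (hmem c (by rw [hl]; exact List.mem_append_left _ hc))
          rcases this with h | h
          · exact h
          · exact absurd (h ▸ hc) hnA
        · have := (mem_elemL c).mp (hmem c (by
            rw [hl]; exact List.mem_append_right _ (List.mem_cons_of_mem _ hc)))
          rcases this with h | h
          · exact h
          · exact absurd (h ▸ hc) hnB
      · rintro ⟨⟨ha, hda⟩, ⟨hb, hdb⟩⟩
        have hnB : '/' ∉ b := fun hc => isdigit_ne_slash (hdb _ hc) rfl
        refine ⟨?_, ?_, ?_⟩
        · push_neg
          constructor
          · rcases a with _ | ⟨x, xs⟩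
            · exact absurd rfl ha
            · rw [hl]
              exact isdigit_ne_slash (hda x List.mem_cons_self)
          · exact isdigit_ne_slash (hdb _ (hlastB hb))
        · rw [hcount, List.count_eq_zero.mpr hnB]
        · intro c hc
          rw [hl] at hc
          rcases List.mem_append.mp hc with h | h
          · exact (mem_elemL c).mpr (Or.inl (hda c h))
          · rcases List.mem_cons.mp h with h | h
            · exact (mem_elemL c).mpr (Or.inr h)
            · exact (mem_elemL c).mpr (Or.inl (hdb c h))
    have hlenP : ((l.length : Int) =
        0 + (l.countP (fun c => decide (c ∈ (['0','1','2','3','4','5','6','7','8','9','/'] : List Char))) : Int)) ↔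
        (∀ c ∈ l, c ∈ (['0','1','2','3','4','5','6','7','8','9','/'] : List Char)) := by
      rw [zero_add]
      constructor
      · intro h
        have hcp : l.countP (fun c => decide (c ∈ (['0','1','2','3','4','5','6','7','8','9','/'] : List Char))) = l.length := by omega
        intro c hc
        simpa using List.countP_eq_length.mp hcp c hc
      · intro h
        have hcp : l.countP (fun c => decide (c ∈ (['0','1','2','3','4','5','6','7','8','9','/'] : List Char))) = l.length :=
          List.countP_eq_length.mpr (fun c hc => by simpa using h c hc)
        omega
    cases hRB : (PySem.Chars.strIsdigit a && PySem.Chars.strIsdigit b) with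
    | true =>
      obtain ⟨hg, hc1, hmem⟩ := hAiff.mpr (hRHS.mp hRB)
      rw [if_neg hg, if_neg (by push_neg; exact_mod_cast hc1), if_pos (hlenP.mpr hmem)]
    | false =>
      have hnotall : ¬ ((¬ (l.getD 0 ' ' = '/' ∨ l.getLast?.getD ' ' = '/')) ∧ List.count '/' l = 1 ∧
          (∀ c ∈ l, c ∈ (['0','1','2','3','4','5','6','7','8','9','/'] : List Char))) := by
        intro h
        rw [hRHS.mpr (hAiff.mp h)] at hRB
        exact Bool.true_eq_false.mp hRB
      split_ifs with h1 h2 h3 <;> try rfl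
      exfalso
      exact hnotall ⟨h1, by exact_mod_cast h2, hlenP.mp h3⟩

-- ===== VERDICT (by name: the statement is the Claim_ definition above) =====
theorem isF_spec : Claim_equal_isF := by
  intro e _ hpre
  show isF e = isF_alt e
  simp only [isF, isF_alt]
  rw [PySem.List.foldl_pyRange_zero_pyGetD' e.toList ' '
        (fun n c => if c ∈ (['0','1','2','3','4','5','6','7','8','9','/'] : List Char) then n + 1 else n) 0,
      PySem.List.foldl_ite_add_one]
  exact key e.toList hpre
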